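-- pv_equiv track=rewrite | github.com/swval22/programacion-2 | Determinar cual es el dato que mas se r.py | lista_repiten
-- ===== SOURCE A (Python) =====
-- def lista_repiten(lista): #Funcion para contar los numeros que se repiten en una lista
--     lista_repetidos=[] #lista que guarde repetidos para evitar realizar el ciclo nuevamente
--     contadoresr=[]
--     for i in lista: #ciclo para recorrer la lista
--         c=0
--
--         if i not in lista_repetidos:
--             for j in lista: #ciclo para contar los numeros repetidos
--                 if i==j:
--                     c+=1
--
--                     lista_repetidos.append(i) #agregar el numero repetido a la lista
--     return lista_repetidos
-- ===== SOURCE B (Python) =====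
-- def lista_repiten(lista):
--     # One pass: bucket each element into a dict keyed by its value (insertion
--     # order preserves first-appearance order), then flatten the buckets.
--     grupos = {}
--     for x in lista:
--         grupos.setdefault(x, []).append(x)
--     resultado = []
--     for bucket in grupos.values():
--         resultado += bucket
--     return resultado
-- ===== Notes on version B (the rewrite author's own statement) =====
-- stated objective: faster
-- what changed: Replaces the rescan-and-repeat nested loops (for each first-seen value, a full inner pass over the list appending a copy per match) with a single bucketing pass into a dict of value->occurrences followed by flattening the buckets.
import Mathlib
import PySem

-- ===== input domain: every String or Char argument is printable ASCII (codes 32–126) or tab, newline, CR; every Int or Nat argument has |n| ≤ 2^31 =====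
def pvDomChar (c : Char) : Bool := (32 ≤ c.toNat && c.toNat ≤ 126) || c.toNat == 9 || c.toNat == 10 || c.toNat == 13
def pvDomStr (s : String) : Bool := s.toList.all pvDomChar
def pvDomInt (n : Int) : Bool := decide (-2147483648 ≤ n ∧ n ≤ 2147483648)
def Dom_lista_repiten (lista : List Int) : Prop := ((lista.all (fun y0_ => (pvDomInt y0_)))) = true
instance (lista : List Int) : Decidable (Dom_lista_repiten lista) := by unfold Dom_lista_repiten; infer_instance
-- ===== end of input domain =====

-- B groups the elements into a dict of buckets in one pass and flattens; A's
-- nested rescan-and-repeat loops are replaced (O(n^2) -> O(n)); same return value.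

-- ===== PORT A =====
-- literal port: outer loop over `lista` with the accumulator `lista_repetidos`;
-- the inner counting loop carries the (unused) counter `c` and appends `i` on
-- every match.  The local `contadoresr = []` is never touched nor returned, so
-- it is omitted from the state.
def lista_repiten (lista : List Int) : List Int :=
  lista.foldl
    (fun lista_repetidos i =>
      if i ∈ lista_repetidos then lista_repetidos
      else
        (lista.foldl
          (fun (st : Int × List Int) j =>
            if i == j then (st.1 + 1, st.2 ++ [i]) else st)
          ((0 : Int), lista_repetidos)).2)
    []

-- ===== PORT B =====
-- literal port of Source B: `grupos.setdefault(x, []).append(x)` sets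
-- grupos[x] = grupos.get(x, []) + [x] keeping the key's position, which is
-- exactly `Dict.modify x [] (· ++ [x])`; then the buckets are concatenated.
def lista_repiten_alt (lista : List Int) : List Int :=
  let grupos : PySem.Dict Int (List Int) :=
    lista.foldl (fun d x => d.modify x [] (· ++ [x])) PySem.Dict.empty
  grupos.values.foldl (fun resultado bucket => resultado ++ bucket) []

-- ===== PRECONDITION & SPEC =====
def Spec_lista_repiten (lista : List Int) (out : List Int) : Prop := out = lista_repiten_alt lista
instance (lista : List Int) (out : List Int) : Decidable (Spec_lista_repiten lista out) := by unfold Spec_lista_repiten; infer_instance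

-- ===== CLAIM (what is proved, stated in full; the proofs are below) =====
def Claim_equal_lista_repiten : Prop := ∀ (lista : List Int), Dom_lista_repiten lista → Spec_lista_repiten lista (lista_repiten lista)

-- ===== LEMMAS AND PROOFS =====

-- one bucket's content: `count` copies of the value
def gRep (lista : List Int) (v : Int) : List Int := List.replicate (lista.count v) v

-- first-occurrence dedup of `l` relative to already-seen `s`
def goDedup : List Int → List Int → List Int
  | [], _ => []
  | x :: xs, s => if x ∈ s then goDedup xs s else x :: goDedup xs (x :: s)

lemma inner_snd (i : Int) :
    ∀ (l : List Int) (c : Int) (rep : List Int),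
      (l.foldl (fun (st : Int × List Int) j =>
          if i == j then (st.1 + 1, st.2 ++ [i]) else st) (c, rep)).2
        = rep ++ List.replicate (l.count i) i := by
  intro l
  induction l with
  | nil => intro c rep; simp
  | cons j t ih =>
    intro c rep
    rw [List.foldl_cons]
    by_cases h : i = j
    · subst h
      rw [if_pos (by simp), ih, List.count_cons_self, List.replicate_succ]
      simp
    · rw [if_neg (by simp [h]), ih]
      simp [Ne.symm h]

lemma goDedup_congr : ∀ (l s s' : List Int), (∀ v, v ∈ s ↔ v ∈ s') →
    goDedup l s = goDedup l s' := by
  intro l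
  induction l with
  | nil => intro s s' _; rfl
  | cons x xs ih =>
    intro s s' h
    by_cases hx : x ∈ s
    · simp [goDedup, hx, (h x).mp hx, ih s s' h]
    · have hx' : x ∉ s' := fun hm => hx ((h x).mpr hm)
      have h' : ∀ v, v ∈ x :: s ↔ v ∈ x :: s' := by
        intro v; simp [h v]
      simp [goDedup, hx, hx', ih _ _ h']

lemma outerA (lista : List Int) :
    ∀ (l s rep : List Int), (∀ x ∈ l, lista.count x ≠ 0) →
      (∀ v, v ∈ rep ↔ v ∈ s) →
      l.foldl
        (fun lista_repetidos i =>
          if i ∈ lista_repetidos then lista_repetidos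
          else
            (lista.foldl
              (fun (st : Int × List Int) j =>
                if i == j then (st.1 + 1, st.2 ++ [i]) else st)
              ((0 : Int), lista_repetidos)).2)
        rep
      = rep ++ (goDedup l s).flatMap (gRep lista) := by
  intro l
  induction l with
  | nil => intro s rep _ _; simp [goDedup]
  | cons x xs ih =>
    intro s rep hcnt hmem
    by_cases hx : x ∈ s
    · have hxr : x ∈ rep := (hmem x).mpr hx
      simpa [goDedup, hx, hxr] using
        ih s rep (fun y hy => hcnt y (List.mem_cons_of_mem _ hy)) hmem
    · have hxr : x ∉ rep := fun hm => hx ((hmem x).mp hm)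
      have hc : lista.count x ≠ 0 := hcnt x (List.mem_cons_self)
      have hmem' : ∀ v, v ∈ rep ++ List.replicate (lista.count x) x ↔ v ∈ x :: s := by
        intro v
        simp [List.mem_append, List.mem_replicate, hmem v, hc]
        tauto
      have := ih (x :: s) (rep ++ List.replicate (lista.count x) x)
        (fun y hy => hcnt y (List.mem_cons_of_mem _ hy)) hmem'
      simp only [goDedup, hx, List.foldl_cons, hxr, if_false]
      rw [inner_snd, this]
      simp [gRep]

lemma A_eq (lista : List Int) :
    lista_repiten lista = (goDedup lista []).flatMap (gRep lista) := by
  unfold lista_repiten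
  rw [outerA lista lista [] [] (fun x hx => by simpa [List.count_eq_zero] using hx)
    (by simp)]
  simp

lemma ofList_eq_goDedup : ∀ (l s : List Int), PySem.Set.update s l = s ++ goDedup l s := by
  intro l
  induction l with
  | nil => intro s; simp [PySem.Set.update, goDedup]
  | cons x xs ih =>
    intro s
    by_cases hx : x ∈ s
    · have : PySem.Set.add s x = s := by
        simp [PySem.Set.add, hx]
      simp only [PySem.Set.update, List.foldl_cons, goDedup, hx, if_pos, this]
      have h2 := ih s
      simpa [PySem.Set.update] using h2
    · have hadd : PySem.Set.add s x = s ++ [x] := by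
        simp [PySem.Set.add, hx]
      have h2 := ih (s ++ [x])
      simp [PySem.Set.update] at h2 ⊢
      rw [hadd, h2, goDedup_congr xs (s ++ [x]) (x :: s) (by intro v; simp; tauto)]
      simp [goDedup, hx]

lemma bucket_getD (lista : List Int) (v : Int) :
    (lista.foldl (fun (d : PySem.Dict Int (List Int)) x => d.modify x [] (· ++ [x]))
        PySem.Dict.empty).getD v [] = gRep lista v := by
  rw [← List.foldl_map (f := fun x : Int => (x, x))
        (g := fun (d : PySem.Dict Int (List Int)) p => d.modify p.1 [] (· ++ [p.2])),
      PySem.Dict.getD_foldl_modify_append]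
  simp [List.filter_map, Function.comp_def, gRep]
  exact List.filter_beq v

lemma B_eq (lista : List Int) :
    lista_repiten_alt lista = (PySem.Set.ofList lista).flatMap (gRep lista) := by
  unfold lista_repiten_alt
  have hnd : (lista.foldl (fun (d : PySem.Dict Int (List Int)) x => d.modify x [] (· ++ [x]))
      PySem.Dict.empty).keys.Nodup :=
    PySem.Dict.nodup_keys_foldl_modify_key lista (fun x => x) []
      (fun d x => (· ++ [x])) PySem.Dict.empty (by simp [pysem])
  have hkeys : (lista.foldl (fun (d : PySem.Dict Int (List Int)) x => d.modify x [] (· ++ [x]))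
      PySem.Dict.empty).keys = PySem.Set.ofList lista := by
    rw [PySem.Dict.keys_foldl_modify (l := lista) (d := PySem.Dict.empty)
        (d0 := ([] : List Int)) (f := fun d x => (· ++ [x]))]
    simp [pysem]
  rw [PySem.List.foldl_append_eq_flatten,
      PySem.Dict.values_eq_map_keys _ hnd ([] : List Int), hkeys]
  simp only [bucket_getD]
  simp [List.flatMap_def]

-- ===== VERDICT (by name: the statement is the Claim_ definition above) =====
theorem lista_repiten_spec : Claim_equal_lista_repiten := by
  intro lista _
  unfold Spec_lista_repiten
  rw [A_eq, B_eq]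
  have : PySem.Set.ofList lista = goDedup lista [] := by
    have := ofList_eq_goDedup lista []
    simpa [PySem.Set.ofList_eq_foldl, PySem.Set.update] using this
  rw [this]
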